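-- pv_equiv track=rewrite | github.com/BartoszMoczkowski/Hololens_data_server | convert_data_to_csv.py | calculate_time_spent_per_step
-- ===== SOURCE A (Python) =====
-- def calculate_time_spent_per_step(step_timestamps, steps):
--
--     time_spent = []
--     prev_time = step_timestamps[0]
--     for timestamp,istep in zip(step_timestamps[1:],steps[:-1]):
--
--         time_spent.append((istep,timestamp - prev_time))
--         prev_time = timestamp
--
--
--     time_per_step = {}
--     for step,time in time_spent:
--         if step not in time_per_step:
--             time_per_step[step] = time
--         else:
--             time_per_step[step] += time
--
--     return time_per_step
-- ===== SOURCE B (Python) =====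
-- def calculate_time_spent_per_step(step_timestamps, steps):
--     # Group-by without a running accumulator dict: first list the distinct step
--     # labels in first-occurrence order, then compute each label's total with a
--     # dedicated per-label scan over the index range (nested scans, no dict
--     # accumulation, no intermediate pair list, no prev_time carry).
--     n = min(len(step_timestamps), len(steps)) - 1
--     active = steps[:n]
--     seen = []
--     for k in active:
--         if k not in seen:
--             seen.append(k)
--     return {k: sum(step_timestamps[i + 1] - step_timestamps[i]
--                    for i in range(n) if active[i] == k)
--             for k in seen}
-- ===== Notes on version B (the rewrite author's own statement) =====
-- stated objective: alternative
-- what changed: Replaces A's single-pass dict accumulation over a staged (step, delta) pair list with a group-by in two phases: dedup the step labels in first-occurrence order, then a dedicated per-label scan summing that label's consecutive-timestamp deltas (trades A's O(n) accumulation for O(n*k) nested scans with no accumulator dict).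
import Mathlib
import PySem

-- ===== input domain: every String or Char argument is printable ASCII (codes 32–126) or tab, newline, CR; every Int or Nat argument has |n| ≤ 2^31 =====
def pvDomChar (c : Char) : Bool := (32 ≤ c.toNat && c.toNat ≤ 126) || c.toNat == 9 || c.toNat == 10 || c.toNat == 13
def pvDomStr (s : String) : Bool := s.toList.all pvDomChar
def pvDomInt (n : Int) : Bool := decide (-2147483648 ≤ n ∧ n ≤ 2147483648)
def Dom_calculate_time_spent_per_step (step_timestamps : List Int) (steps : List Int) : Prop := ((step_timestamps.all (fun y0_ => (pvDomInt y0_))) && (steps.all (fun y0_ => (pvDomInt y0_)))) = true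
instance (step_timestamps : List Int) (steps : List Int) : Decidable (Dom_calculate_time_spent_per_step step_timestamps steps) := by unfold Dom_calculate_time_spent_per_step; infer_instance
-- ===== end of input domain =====

-- B replaces A's single-pass dict accumulation over a staged (step, delta) pair list with a
-- group-by: dedup the step labels in first-occurrence order, then one per-label scan summing
-- that label's consecutive-timestamp deltas; equal output on Pre_ (step_timestamps ≠ []).

-- ===== PORT A =====
def calculate_time_spent_per_step (step_timestamps : List Int) (steps : List Int) : List (Int × Int) :=
  -- prev_time = step_timestamps[0]: pyGetD is exact here because Pre_ requires step_timestamps ≠ []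
  let prev0 : Int := PySem.List.pyGetD step_timestamps 0 0
  let loop1 := ((PySem.List.slice step_timestamps (some 1) none).zip
      (PySem.List.slice steps none (some (-1)))).foldl
      (fun (st : List (Int × Int) × Int) q => (st.1 ++ [(q.2, q.1 - st.2)], q.1))
      ([], prev0)
  let time_spent := loop1.1
  let time_per_step := time_spent.foldl
      (fun (d : PySem.Dict Int Int) p =>
        if d.contains p.1 then d.modify p.1 0 (· + p.2) else d.insert p.1 p.2)
      PySem.Dict.empty
  time_per_step.items

-- ===== PORT B =====
def calculate_time_spent_per_step_alt (step_timestamps : List Int) (steps : List Int) : List (Int × Int) :=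
  let n : Int := min (step_timestamps.length : Int) (steps.length : Int) - 1
  let active := PySem.List.slice steps none (some n)
  let seen : PySem.Set Int := active.foldl (fun s k => PySem.Set.add s k) PySem.Set.empty
  seen.map (fun k =>
    (k, ((PySem.List.pyRange 0 n 1).filter
          (fun i => PySem.List.pyGetD active i 0 == k)).foldl
        (fun acc i => acc + (PySem.List.pyGetD step_timestamps (i + 1) 0
                             - PySem.List.pyGetD step_timestamps i 0)) 0))

-- ===== PRECONDITION & SPEC =====
-- Pre_ excludes exactly the inputs where A raises: step_timestamps[0] is an IndexError on [].
def Pre_calculate_time_spent_per_step (step_timestamps : List Int) (steps : List Int) : Prop :=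
  step_timestamps ≠ []
instance (step_timestamps : List Int) (steps : List Int) : Decidable (Pre_calculate_time_spent_per_step step_timestamps steps) := by unfold Pre_calculate_time_spent_per_step; infer_instance
def pvWitness_calculate_time_spent_per_step : List Int × List Int := ([0, 2, 5], [1, 1])

def Spec_calculate_time_spent_per_step (step_timestamps : List Int) (steps : List Int) (out : List (Int × Int)) : Prop := out = calculate_time_spent_per_step_alt step_timestamps steps
instance (step_timestamps : List Int) (steps : List Int) (out : List (Int × Int)) : Decidable (Spec_calculate_time_spent_per_step step_timestamps steps out) := by unfold Spec_calculate_time_spent_per_step; infer_instance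

-- ===== CLAIM (what is proved, stated in full; the proofs are below) =====
def Claim_equal_calculate_time_spent_per_step : Prop := ∀ (step_timestamps : List Int) (steps : List Int), Dom_calculate_time_spent_per_step step_timestamps steps → Pre_calculate_time_spent_per_step step_timestamps steps → Spec_calculate_time_spent_per_step step_timestamps steps (calculate_time_spent_per_step step_timestamps steps)

-- ===== LEMMAS AND PROOFS =====

/-- The (step, delta) pair list A's first loop builds, as structural recursion. -/
def pvDeltas : Int → List Int → List Int → List (Int × Int)
  | p, x :: u, y :: v => (y, x - p) :: pvDeltas x u v
  | _, _, _ => []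

lemma pvFoldA_fst : ∀ (u v : List Int) (acc : List (Int × Int)) (p : Int),
    ((u.zip v).foldl (fun (st : List (Int × Int) × Int) q => (st.1 ++ [(q.2, q.1 - st.2)], q.1)) (acc, p)).1
      = acc ++ pvDeltas p u v := by
  intro u
  induction u with
  | nil => intro v acc p; simp [pvDeltas]
  | cons x u ih =>
    intro v acc p
    cases v with
    | nil => simp [pvDeltas]
    | cons y v =>
      simpa [List.zip, pvDeltas, List.append_assoc] using ih v (acc ++ [(y, x - p)]) x

lemma pvDeltas_eq : ∀ (u v : List Int) (p : Int),
    pvDeltas p u v = (List.range (min u.length v.length)).map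
      (fun i => (v.getD i 0, (p :: u).getD (i + 1) 0 - (p :: u).getD i 0)) := by
  intro u
  induction u with
  | nil => intro v p; simp [pvDeltas]
  | cons x u ih =>
    intro v p
    cases v with
    | nil => simp [pvDeltas]
    | cons y v =>
      have : min (x :: u).length (y :: v).length = min u.length v.length + 1 := by
        simp only [List.length_cons]; omega
      rw [pvDeltas, this, List.range_succ_eq_map, List.map_cons, List.map_map, ih]
      simp [Function.comp, List.getD]

lemma pvStepA (d : PySem.Dict Int Int) (p : Int × Int) :
    (if d.contains p.1 then d.modify p.1 0 (· + p.2) else d.insert p.1 p.2)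
      = d.insert p.1 (d.getD p.1 0 + p.2) := by
  by_cases h : d.contains p.1 = true
  · simp only [h, if_true]; rfl
  · simp only [Bool.not_eq_true] at h
    rw [if_neg (by simp [h]), PySem.Dict.getD_of_not_contains _ _ h, zero_add]

lemma pvGetD_foldl_insert_add (P : List (Int × Int)) :
    ∀ (d : PySem.Dict Int Int) (k : Int),
    (P.foldl (fun d (p : Int × Int) => d.insert p.1 (d.getD p.1 0 + p.2)) d).getD k 0
      = d.getD k 0 + ((P.filter (fun p => p.1 == k)).map Prod.snd).sum := by
  induction P with
  | nil => intro d k; simp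
  | cons p P ih =>
    intro d k
    rw [List.foldl_cons, ih, PySem.Dict.getD_insert]
    by_cases h : p.1 = k
    · simp [h]; ring
    · simp [h, Ne.symm h]

/-- Normal form of A's accumulation loop: group-by over first-occurrence keys. -/
lemma pvItems_foldl (P : List (Int × Int)) :
    (P.foldl (fun d (p : Int × Int) => d.insert p.1 (d.getD p.1 0 + p.2)) PySem.Dict.empty).items
      = (PySem.Set.ofList (P.map Prod.fst)).map
          (fun k => (k, ((P.filter (fun p => p.1 == k)).map Prod.snd).sum)) := by
  have hkeys : (P.foldl (fun d (p : Int × Int) => d.insert p.1 (d.getD p.1 0 + p.2)) PySem.Dict.empty).keys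
      = PySem.Set.ofList (P.map Prod.fst) := by
    rw [PySem.Dict.keys_foldl_insert_key, PySem.Dict.keys_empty, PySem.Set.update_nil_left]
  have hnd : (P.foldl (fun d (p : Int × Int) => d.insert p.1 (d.getD p.1 0 + p.2)) PySem.Dict.empty).keys.Nodup := by
    exact PySem.Dict.nodup_keys_foldl_insert_key P Prod.fst _ _ (by simp [PySem.Dict.keys_empty])
  rw [PySem.Dict.items_eq_map_keys _ hnd 0, hkeys]
  apply List.map_congr_left
  intro k _
  rw [pvGetD_foldl_insert_add]
  simp

lemma pvDropLast_getD (v : List Int) (i : ℕ) (h : i < v.length - 1) :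
    v.dropLast.getD i 0 = v.getD i 0 := by
  rw [List.getD_eq_getElem?_getD, List.getD_eq_getElem?_getD, List.getElem?_dropLast, if_pos h]

lemma pvRangeMap_take (v : List Int) (nn : ℕ) (h : nn ≤ v.length) :
    (List.range nn).map (fun i => v.getD i 0) = v.take nn := by
  apply List.ext_getElem
  · simp [h]
  · intro i h1 h2
    simp only [List.getElem_map, List.getElem_range, List.getElem_take]
    rw [List.getD_eq_getElem?_getD]
    simp at h1
    simp [List.getElem?_eq_getElem (by omega : i < v.length)]

-- ===== VERDICT (by name: the statement is the Claim_ definition above) =====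
theorem calculate_time_spent_per_step_spec : Claim_equal_calculate_time_spent_per_step := by
  intro ts steps _ hpre
  unfold Spec_calculate_time_spent_per_step
  cases ts with
  | nil => exact absurd rfl hpre
  | cons t0 rest =>
    unfold calculate_time_spent_per_step calculate_time_spent_per_step_alt
    simp only [PySem.List.slice_from_one, PySem.List.slice_to_neg_one, List.tail_cons,
      PySem.List.pyGetD_zero_cons, pvStepA]
    rw [pvFoldA_fst, List.nil_append, pvDeltas_eq, pvItems_foldl]
    -- shared size: nn = min(|ts|,|steps|) - 1 as a Nat
    set nInt : Int := min ((t0 :: rest).length : Int) (steps.length : Int) - 1 with hnInt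
    have hnn : min rest.length steps.dropLast.length = nInt.toNat := by
      simp only [hnInt, List.length_dropLast, List.length_cons]; omega
    have hle : nInt.toNat ≤ steps.length := by simp only [hnInt, List.length_cons]; omega
    have hlt : nInt.toNat ≤ steps.length - 1 := by
      simp only [hnInt, List.length_cons]; omega
    -- first-loop keys: steps.dropLast.getD i = steps.getD i on the range, = steps.take nn
    have hmapP : (List.range (min rest.length steps.dropLast.length)).map
        (fun i => ((steps.dropLast.getD i 0 : Int),
          ((t0 :: rest).getD (i + 1) 0 - (t0 :: rest).getD i 0 : Int)))
      = (List.range nInt.toNat).map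
        (fun i => ((steps.getD i 0 : Int),
          ((t0 :: rest).getD (i + 1) 0 - (t0 :: rest).getD i 0 : Int))) := by
      rw [hnn]
      apply List.map_congr_left
      intro i hi
      rw [List.mem_range] at hi
      rw [pvDropLast_getD steps i (lt_of_lt_of_le hi hlt)]
    rw [hmapP]
    -- B's active slice = steps.take nn
    have hactive : PySem.List.slice steps none (some nInt) = steps.take nInt.toNat := by
      by_cases h0 : 0 ≤ nInt
      · exact PySem.List.slice_to steps h0
      · have h1 : nInt = -1 := by simp only [hnInt, List.length_cons] at h0 ⊢; omega
        have h2 : steps = [] := by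
          cases steps with
          | nil => rfl
          | cons a b => simp only [hnInt, List.length_cons] at h1; omega
        subst h2; simp [h1, PySem.List.slice_to_neg_one]
    rw [hactive]
    -- key lists coincide
    rw [List.map_map]
    have hkeys : (List.range nInt.toNat).map
        ((fun p : Int × Int => p.1) ∘ fun i => ((steps.getD i 0 : Int),
          ((t0 :: rest).getD (i + 1) 0 - (t0 :: rest).getD i 0 : Int)))
        = steps.take nInt.toNat := by
      rw [show ((fun p : Int × Int => p.1) ∘ fun i => ((steps.getD i 0 : Int),
          ((t0 :: rest).getD (i + 1) 0 - (t0 :: rest).getD i 0 : Int)))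
        = fun i => steps.getD i 0 from rfl, pvRangeMap_take steps _ hle]
    rw [hkeys]
    rw [show (List.take nInt.toNat steps).foldl (fun (s : PySem.Set Int) k => s.add k) PySem.Set.empty
        = PySem.Set.ofList (List.take nInt.toNat steps) from (PySem.Set.ofList_eq_foldl _).symm]
    apply List.map_congr_left
    intro k _
    congr 1
    -- value at key k: A's filtered pair sum = B's filtered index fold
    rw [List.filter_map, List.map_map,
      PySem.List.foldl_add (g := fun i : Int =>
        PySem.List.pyGetD (t0 :: rest) (i + 1) 0 - PySem.List.pyGetD (t0 :: rest) i 0),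
      zero_add, PySem.List.pyRange_one, List.filter_map, List.map_map]
    simp only [Int.sub_zero]
    have hfilter : (List.range nInt.toNat).filter
        ((fun i : Int => PySem.List.pyGetD (steps.take nInt.toNat) i 0 == k) ∘ fun i : ℕ => (0 : Int) + i)
        = (List.range nInt.toNat).filter
        ((fun p : Int × Int => p.1 == k) ∘ fun i => ((steps.getD i 0 : Int),
          ((t0 :: rest).getD (i + 1) 0 - (t0 :: rest).getD i 0 : Int))) := by
      apply List.filter_congr
      intro i hi
      rw [List.mem_range] at hi
      simp only [Function.comp, zero_add, PySem.List.pyGetD_natCast]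
      rw [List.getD_eq_getElem?_getD, List.getD_eq_getElem?_getD, List.getElem?_take,
        if_pos hi]
    rw [hfilter]
    apply congrArg List.sum
    apply List.map_congr_left
    intro i hi
    have hi' := (List.mem_filter.mp hi).1
    rw [List.mem_range] at hi'
    simp only [Function.comp, zero_add,
      show ((i : Int) + 1) = (((i + 1 : ℕ)) : Int) by push_cast; ring,
      PySem.List.pyGetD_natCast]
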